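-- pv_equiv track=rewrite | github.com/tababio/taba | TABA_dist/func_TestaEquacao.py | criaListaVariaveis
-- ===== SOURCE A (Python) =====
-- def criaListaVariaveis(formula):
--     #prepara para split
--     form = formula.replace("-","#")
--     form = form.replace("+","#")
--     form = form.replace("*","#")
--     form = form.replace("(","#")
--     form = form.replace(")","#")
--     form = form.replace(".","") # nãp pode ter ponto para isdigit()
--     form = form.replace("\n","")
--     form_aux = form.split("#")
--     form_aux = [x for x in form_aux if x != '']
--     listaVariaveis = []
--     for i in form_aux:
--         aux = str(i).strip()
--         if (not aux.isdigit()):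
--             listaVariaveis.append(i)
--     return listaVariaveis
-- ===== SOURCE B (Python) =====
-- def criaListaVariaveis(formula):
--     listaVariaveis = []
--     buf = []
--     for ch in formula:
--         if ch == '.' or ch == '\n':
--             continue
--         if ch in '-+*()#':
--             tok = ''.join(buf)
--             buf = []
--             if tok and not tok.strip().isdigit():
--                 listaVariaveis.append(tok)
--         else:
--             buf.append(ch)
--     tok = ''.join(buf)
--     if tok and not tok.strip().isdigit():
--         listaVariaveis.append(tok)
--     return listaVariaveis
-- ===== Notes on version B (the rewrite author's own statement) =====
-- stated objective: alternative
-- what changed: Replaced the seven whole-string replace passes plus split-then-filter with a single left-to-right character scan that deletes the dot and newline characters, flushes a token buffer at separator characters, and filters digit-only tokens at flush time.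
import Mathlib
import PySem

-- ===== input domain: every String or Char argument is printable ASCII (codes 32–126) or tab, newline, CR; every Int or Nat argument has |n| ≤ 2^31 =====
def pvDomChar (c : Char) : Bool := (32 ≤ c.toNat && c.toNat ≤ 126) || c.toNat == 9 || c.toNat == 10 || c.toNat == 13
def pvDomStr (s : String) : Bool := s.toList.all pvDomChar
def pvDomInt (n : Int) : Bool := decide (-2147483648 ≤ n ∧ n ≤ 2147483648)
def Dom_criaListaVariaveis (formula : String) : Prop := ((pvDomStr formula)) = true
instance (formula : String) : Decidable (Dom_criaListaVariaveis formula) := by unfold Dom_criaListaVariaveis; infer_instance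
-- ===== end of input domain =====

-- B replaces the seven whole-string replace passes + split of A by a single left-to-right
-- character scan with a token buffer (objective: alternative one-pass decomposition).

-- ===== PORT A =====
def criaListaVariaveis (formula : String) : List String :=
  let form := PySem.Str.replace formula "-" "#"
  let form := PySem.Str.replace form "+" "#"
  let form := PySem.Str.replace form "*" "#"
  let form := PySem.Str.replace form "(" "#"
  let form := PySem.Str.replace form ")" "#"
  let form := PySem.Str.replace form "." ""
  let form := PySem.Str.replace form "\n" ""
  -- sep "#" is nonempty, so Python's split never raises; split? is always some here
  let form_aux := (PySem.Str.split? form "#").getD []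
  let form_aux := form_aux.filter (fun x => x != "")
  form_aux.foldl (fun listaVariaveis i =>
    let aux := PySem.Str.strip i
    if ¬ (PySem.Str.strIsdigit aux = true) then listaVariaveis ++ [i] else listaVariaveis) []

-- ===== PORT B =====
-- flush of Source B: append the buffered token unless empty or digit-only after strip
def pvFlush (buf : List Char) (acc : List String) : List String :=
  let tok := String.ofList buf
  if tok != "" && !(PySem.Str.strIsdigit (PySem.Str.strip tok)) then acc ++ [tok] else acc

-- the character scan of Source B
def pvScan : List Char → List Char → List String → List String
  | [], buf, acc => pvFlush buf acc
  | c :: t, buf, acc =>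
    if c = '.' ∨ c = '\n' then pvScan t buf acc
    else if c = '-' ∨ c = '+' ∨ c = '*' ∨ c = '(' ∨ c = ')' ∨ c = '#' then
      pvScan t [] (pvFlush buf acc)
    else pvScan t (buf ++ [c]) acc

def criaListaVariaveis_alt (formula : String) : List String :=
  pvScan formula.toList [] []

-- ===== PRECONDITION & SPEC =====
def Spec_criaListaVariaveis (formula : String) (out : List String) : Prop := out = criaListaVariaveis_alt formula
instance (formula : String) (out : List String) : Decidable (Spec_criaListaVariaveis formula out) := by unfold Spec_criaListaVariaveis; infer_instance

-- ===== CLAIM (what is proved, stated in full; the proofs are below) =====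
def Claim_equal_criaListaVariaveis : Prop := ∀ (formula : String), Dom_criaListaVariaveis formula → Spec_criaListaVariaveis formula (criaListaVariaveis formula)

-- ===== LEMMAS AND PROOFS =====

-- A's five separator replacements composed into one character map
def pvM (c : Char) : Char :=
  if c = '-' ∨ c = '+' ∨ c = '*' ∨ c = '(' ∨ c = ')' then '#' else c

-- A's whole preprocessing pipeline at the List Char level
def pvProc (cs : List Char) : List Char :=
  ((cs.map pvM).filter (fun c => !(c == '.'))).filter (fun c => !(c == '\n'))

-- splitting on '#', buffer kept in order
def pvSplit : List Char → List Char → List (List Char)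
  | [], cur => [cur]
  | c :: t, cur => if c = '#' then cur :: pvSplit t [] else pvSplit t (cur ++ [c])

def pvKeep (t : List Char) : Bool :=
  !t.isEmpty && !(PySem.Chars.strIsdigit (PySem.Chars.strip t))

def pvOut (ts : List (List Char)) : List String :=
  (ts.filter pvKeep).map String.ofList

-- single-char replace: replace.go is a flatMap
theorem pv_replace_go (a : Char) (new : List Char) :
    ∀ (l : List Char) (fuel : Nat) (acc : List Char), l.length ≤ fuel →
      PySem.Chars.replace.go [a] new fuel l acc
        = acc.reverse ++ l.flatMap (fun c => if c = a then new else [c]) := by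
  intro l
  induction l with
  | nil =>
      intro fuel acc _
      cases fuel <;> simp [PySem.Chars.replace.go]
  | cons c t ih =>
      intro fuel acc h
      cases fuel with
      | zero => simp at h
      | succ n =>
        simp only [PySem.Chars.replace.go, List.isPrefixOf, List.flatMap_cons]
        by_cases hc : c = a
        · subst hc
          simp only [BEq.rfl, Bool.true_and, List.isPrefixOf_nil_left, if_pos,
            List.length_cons, List.length_nil, List.drop_succ_cons, List.drop_zero]
          rw [ih n (new.reverse ++ acc) (by simpa using Nat.le_of_succ_le_succ h)]
          simp
        · have : (a == c) = false := by simp [beq_iff_eq]; exact fun he => hc he.symm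
          simp only [this, Bool.false_and, if_neg Bool.false_ne_true]
          rw [ih n (c :: acc) (by simpa using Nat.le_of_succ_le_succ h)]
          simp [hc]

theorem pv_replace_single (cs : List Char) (a : Char) (new : List Char) :
    PySem.Chars.replace cs [a] new = cs.flatMap (fun c => if c = a then new else [c]) := by
  simp [PySem.Chars.replace, pv_replace_go a new cs cs.length [] (le_refl _)]

theorem pv_replace_map (cs : List Char) (a b : Char) :
    PySem.Chars.replace cs [a] [b] = cs.map (fun c => if c = a then b else c) := by
  rw [pv_replace_single]
  induction cs with
  | nil => rfl
  | cons c t ih => by_cases h : c = a <;> simp [h, ih]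

theorem pv_replace_del (cs : List Char) (a : Char) :
    PySem.Chars.replace cs [a] [] = cs.filter (fun c => !(c == a)) := by
  rw [pv_replace_single]
  induction cs with
  | nil => rfl
  | cons c t ih => by_cases h : c = a <;> simp [h, ih]

-- splitOn with single separator '#' is pvSplit
theorem pv_splitOn_go :
    ∀ (l : List Char) (fuel : Nat) (cur : List Char) (acc : List (List Char)),
      l.length ≤ fuel →
      PySem.Chars.splitOn.go ['#'] fuel l cur acc = acc.reverse ++ pvSplit l cur.reverse := by
  intro l
  induction l with
  | nil =>
      intro fuel cur acc _
      cases fuel <;> simp [PySem.Chars.splitOn.go, pvSplit]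
  | cons c t ih =>
      intro fuel cur acc h
      cases fuel with
      | zero => simp at h
      | succ n =>
        simp only [PySem.Chars.splitOn.go, List.isPrefixOf, pvSplit]
        by_cases hc : c = '#'
        · subst hc
          simp only [BEq.rfl, Bool.true_and, List.isPrefixOf_nil_left, if_pos,
            List.length_cons, List.length_nil, List.drop_succ_cons, List.drop_zero]
          rw [ih n [] (cur.reverse :: acc) (by simpa using Nat.le_of_succ_le_succ h)]
          simp
        · have : (('#' : Char) == c) = false := by simp [beq_iff_eq]; exact fun he => hc he.symm
          simp only [this, Bool.false_and, if_neg Bool.false_ne_true, if_neg hc]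
          rw [ih n (c :: cur) acc (by simpa using Nat.le_of_succ_le_succ h)]
          simp

theorem pv_splitOn (cs : List Char) :
    PySem.Chars.splitOn cs ['#'] = pvSplit cs [] := by
  simpa using pv_splitOn_go cs (cs.length + 1) [] [] (Nat.le_succ _)

-- pvProc on a cons
theorem pv_proc_cons (c : Char) (t : List Char) :
    pvProc (c :: t) =
      if c = '.' ∨ c = '\n' then pvProc t
      else if c = '-' ∨ c = '+' ∨ c = '*' ∨ c = '(' ∨ c = ')' then '#' :: pvProc t
      else c :: pvProc t := by
  by_cases hd : c = '.' ∨ c = '\n'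
  · rcases hd with h | h <;> subst h <;> simp [pvProc, pvM]
  · by_cases hs : c = '-' ∨ c = '+' ∨ c = '*' ∨ c = '(' ∨ c = ')'
    · have hm : pvM c = '#' := by simp [pvM, hs]
      simp [pvProc, hm, hd, hs]
    · have hm : pvM c = c := by simp [pvM, hs]
      have hd1 : c ≠ '.' := fun h => hd (Or.inl h)
      have hd2 : c ≠ '\n' := fun h => hd (Or.inr h)
      simp [pvProc, hm, hd1, hd2, hd, hs]

theorem pv_out_cons (t : List Char) (ts : List (List Char)) :
    pvOut (t :: ts) = (if pvKeep t then [String.ofList t] else []) ++ pvOut ts := by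
  by_cases h : pvKeep t <;> simp [pvOut, List.filter, h]

theorem pv_ofList_ne_empty (l : List Char) : (String.ofList l != "") = !l.isEmpty := by
  cases l with
  | nil => rfl
  | cons c t =>
      have : String.ofList (c :: t) ≠ "" := by
        intro h
        have := congrArg String.toList h
        simp at this
      simp [bne, beq_iff_eq, this]

theorem pv_flush (buf : List Char) (acc : List String) :
    pvFlush buf acc = acc ++ (if pvKeep buf then [String.ofList buf] else []) := by
  have hb : (PySem.Str.strIsdigit (PySem.Str.strip (String.ofList buf)))
      = PySem.Chars.strIsdigit (PySem.Chars.strip buf) := by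
    rw [PySem.Str.strIsdigit_eq, PySem.Str.toList_strip]
    simp
  by_cases h : pvKeep buf
  · have h' := h
    unfold pvKeep at h'
    simp [pvFlush, pv_ofList_ne_empty, hb, h, h']
  · have h' := h
    unfold pvKeep at h'
    simp [pvFlush, pv_ofList_ne_empty, hb, h, h']

-- main invariant of B's scan
theorem pv_scan_eq :
    ∀ (cs buf : List Char) (acc : List String),
      pvScan cs buf acc = acc ++ pvOut (pvSplit (pvProc cs) buf) := by
  intro cs
  induction cs with
  | nil =>
      intro buf acc
      by_cases hk : pvKeep buf <;>
        simp [pvScan, pvProc, pvSplit, pv_flush, pvOut, List.filter, hk]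
  | cons c t ih =>
      intro buf acc
      rw [pv_proc_cons]
      by_cases hd : c = '.' ∨ c = '\n'
      · rw [if_pos hd]
        simp only [pvScan, if_pos hd]
        exact ih buf acc
      · rw [if_neg hd]
        by_cases hs : c = '-' ∨ c = '+' ∨ c = '*' ∨ c = '(' ∨ c = ')'
        · have hsep : c = '-' ∨ c = '+' ∨ c = '*' ∨ c = '(' ∨ c = ')' ∨ c = '#' := by tauto
          rw [if_pos hs]
          simp only [pvScan, if_neg hd, if_pos hsep]
          rw [ih, pv_flush]
          simp [pvSplit, pv_out_cons, List.append_assoc]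
        · rw [if_neg hs]
          by_cases hh : c = '#'
          · have hsep : c = '-' ∨ c = '+' ∨ c = '*' ∨ c = '(' ∨ c = ')' ∨ c = '#' := by tauto
            simp only [pvScan, if_neg hd, if_pos hsep]
            rw [ih, pv_flush]
            simp [pvSplit, hh, pv_out_cons, List.append_assoc]
          · have hsep : ¬ (c = '-' ∨ c = '+' ∨ c = '*' ∨ c = '(' ∨ c = ')' ∨ c = '#') := by
              tauto
            simp only [pvScan, if_neg hd, if_neg hsep]
            rw [ih]
            simp [pvSplit, hh]

-- the composed substitution of A's five replaces
theorem pv_subst_chain (c : Char) :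
    (if (if (if (if (if c = '-' then '#' else c) = '+' then '#'
        else (if c = '-' then '#' else c)) = '*' then '#'
        else (if (if c = '-' then '#' else c) = '+' then '#' else (if c = '-' then '#' else c)))
        = '(' then '#'
        else (if (if (if c = '-' then '#' else c) = '+' then '#'
        else (if c = '-' then '#' else c)) = '*' then '#'
        else (if (if c = '-' then '#' else c) = '+' then '#' else (if c = '-' then '#' else c))))
        = ')' then '#'
        else (if (if (if (if c = '-' then '#' else c) = '+' then '#'
        else (if c = '-' then '#' else c)) = '*' then '#'
        else (if (if c = '-' then '#' else c) = '+' then '#' else (if c = '-' then '#' else c)))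
        = '(' then '#'
        else (if (if (if c = '-' then '#' else c) = '+' then '#'
        else (if c = '-' then '#' else c)) = '*' then '#'
        else (if (if c = '-' then '#' else c) = '+' then '#' else (if c = '-' then '#' else c)))))
      = pvM c := by
  by_cases h1 : c = '-'
  · subst h1; decide
  by_cases h2 : c = '+'
  · subst h2; decide
  by_cases h3 : c = '*'
  · subst h3; decide
  by_cases h4 : c = '('
  · subst h4; decide
  by_cases h5 : c = ')'
  · subst h5; decide
  simp [h1, h2, h3, h4, h5, pvM]

-- the five separator replaces, chained, are one map with pvM
theorem pv_map_chain : ∀ (cs : List Char),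
    (((((cs.map (fun c => if c = '-' then '#' else c)).map
        (fun c => if c = '+' then '#' else c)).map
        (fun c => if c = '*' then '#' else c)).map
        (fun c => if c = '(' then '#' else c)).map
        (fun c => if c = ')' then '#' else c)) = cs.map pvM
  | [] => rfl
  | c :: t => by
      simp only [List.map_cons]
      rw [pv_map_chain t]
      exact congrArg (· :: t.map pvM) (pv_subst_chain c)

-- the token filter of A equals pvOut
theorem pv_filter_eq_out (ts : List (List Char)) :
    ((ts.map String.ofList).filter (fun x => x != "")).filter
        (fun x => decide (¬ (PySem.Str.strIsdigit (PySem.Str.strip x) = true)))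
      = pvOut ts := by
  induction ts with
  | nil => rfl
  | cons t ts ih =>
      have hb : (PySem.Str.strIsdigit (PySem.Str.strip (String.ofList t)))
          = PySem.Chars.strIsdigit (PySem.Chars.strip t) := by
        rw [PySem.Str.strIsdigit_eq, PySem.Str.toList_strip]
        simp
      have hq : (decide (¬ (PySem.Str.strIsdigit (PySem.Str.strip (String.ofList t)) = true)))
          = !(PySem.Chars.strIsdigit (PySem.Chars.strip t)) := by
        rw [hb]
        cases PySem.Chars.strIsdigit (PySem.Chars.strip t) <;> simp
      rw [List.map_cons, List.filter_cons, pv_ofList_ne_empty, pv_out_cons]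
      by_cases ht : t.isEmpty
      · have hk : pvKeep t = false := by simp [pvKeep, ht]
        simp only [ht, hk]
        simp only [Bool.not_true, Bool.false_eq_true, if_false, if_neg]
        simpa using ih
      · have ht' : (!t.isEmpty) = true := by simp [ht]
        rw [ht', if_pos rfl, List.filter_cons, hq]
        cases hB : PySem.Chars.strIsdigit (PySem.Chars.strip t)
        · have hk : pvKeep t = true := by simp [pvKeep, ht, hB]
          simp only [hk, hB, Bool.not_false, if_pos]
          simp only [if_true, List.cons_append, List.nil_append, pvOut]
          refine congrArg (String.ofList t :: ·) ?_
          simpa [pvOut] using ih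
        · have hk : pvKeep t = false := by simp [pvKeep, hB]
          simp only [hk, hB, Bool.not_true, Bool.false_eq_true, if_false, if_neg]
          simpa using ih

theorem pv_a_eq (formula : String) :
    criaListaVariaveis formula = pvOut (pvSplit (pvProc formula.toList) []) := by
  unfold criaListaVariaveis
  rw [PySem.List.foldl_append_ite_eq_filter]
  have hform : (PySem.Str.replace (PySem.Str.replace (PySem.Str.replace (PySem.Str.replace
      (PySem.Str.replace (PySem.Str.replace (PySem.Str.replace formula "-" "#") "+" "#")
      "*" "#") "(" "#") ")" "#") "." "") "\n" "").toList = pvProc formula.toList := by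
    simp only [PySem.Str.toList_replace]
    have h1 : ("-" : String).toList = ['-'] := by decide
    have h2 : ("+" : String).toList = ['+'] := by decide
    have h3 : ("*" : String).toList = ['*'] := by decide
    have h4 : ("(" : String).toList = ['('] := by decide
    have h5 : (")" : String).toList = [')'] := by decide
    have h6 : ("." : String).toList = ['.'] := by decide
    have h7 : ("\n" : String).toList = ['\n'] := by decide
    have h8 : ("#" : String).toList = ['#'] := by decide
    have h9 : ("" : String).toList = [] := by decide
    rw [h1, h2, h3, h4, h5, h6, h7, h8, h9]
    rw [pv_replace_map, pv_replace_map, pv_replace_map, pv_replace_map, pv_replace_map,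
        pv_replace_del, pv_replace_del, pv_map_chain]
    rfl
  have hsplit : PySem.Str.split? (PySem.Str.replace (PySem.Str.replace (PySem.Str.replace
      (PySem.Str.replace (PySem.Str.replace (PySem.Str.replace (PySem.Str.replace formula
      "-" "#") "+" "#") "*" "#") "(" "#") ")" "#") "." "") "\n" "") "#"
      = some ((pvSplit (pvProc formula.toList) []).map String.ofList) := by
    unfold PySem.Str.split?
    rw [hform]
    have h8 : ("#" : String).toList = ['#'] := by decide
    rw [h8]
    simp [PySem.Chars.split?, pv_splitOn]
  rw [hsplit]
  simp only [Option.getD_some]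
  exact pv_filter_eq_out _

-- ===== VERDICT (by name: the statement is the Claim_ definition above) =====
theorem criaListaVariaveis_spec : Claim_equal_criaListaVariaveis := by
  intro formula _
  unfold Spec_criaListaVariaveis criaListaVariaveis_alt
  rw [pv_a_eq, pv_scan_eq]
  simp
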